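-- pv_equiv track=rewrite | github.com/Dakshitj14/CI-CD | backend/agents/test_agent.py | _pick_failure_type
-- ===== SOURCE A (Python) =====
-- def _pick_failure_type(types):
--     priority = [
--         "COLLECTION_ERROR",
--         "IMPORT_ERROR",
--         "ASSERTION_ERROR",
--         "TEST_FAILURE",
--         "NO_TESTS_COLLECTED",
--     ]
--     for item in priority:
--         if item in types:
--             return item
--     return types[0] if types else "FAILURE"
-- ===== SOURCE B (Python) =====
-- def _pick_failure_type(types):
--     rank = {
--         "COLLECTION_ERROR": 0,
--         "IMPORT_ERROR": 1,
--         "ASSERTION_ERROR": 2,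
--         "TEST_FAILURE": 3,
--         "NO_TESTS_COLLECTED": 4,
--     }
--     best = None
--     for t in types:
--         r = rank.get(t)
--         if r is not None and (best is None or r < best[0]):
--             best = (r, t)
--     if best is not None:
--         return best[1]
--     return types[0] if types else "FAILURE"
-- ===== Notes on version B (the rewrite author's own statement) =====
-- stated objective: alternative
-- what changed: B inverts the traversal: instead of scanning the fixed priority list and testing membership in types for each entry, B makes a single pass over types with a priority->rank lookup table, keeping the best-ranked match seen so far.
import Mathlib
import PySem

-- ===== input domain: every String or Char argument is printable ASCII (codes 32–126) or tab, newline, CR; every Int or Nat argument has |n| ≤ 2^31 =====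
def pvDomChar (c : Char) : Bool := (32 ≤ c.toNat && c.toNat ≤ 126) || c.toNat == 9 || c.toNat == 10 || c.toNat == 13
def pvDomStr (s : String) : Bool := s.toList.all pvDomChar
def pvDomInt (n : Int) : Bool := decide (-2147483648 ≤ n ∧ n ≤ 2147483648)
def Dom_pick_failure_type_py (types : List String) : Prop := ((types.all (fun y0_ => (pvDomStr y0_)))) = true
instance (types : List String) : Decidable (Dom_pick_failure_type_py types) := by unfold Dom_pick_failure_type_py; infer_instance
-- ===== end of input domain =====

-- B replaces A's scan of the priority list (membership test per priority) by a single pass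
-- over `types` with a priority->rank lookup table, keeping the best-ranked match (alternative decomposition).

-- ===== PORT A =====
-- the `for item in priority: if item in types: return item` loop
def pickLoopA : List String → List String → Option String
  | [], _ => none
  | p :: ps, types => if types.contains p then some p else pickLoopA ps types

def pick_failure_type_py (types : List String) : String :=
  let priority := ["COLLECTION_ERROR", "IMPORT_ERROR", "ASSERTION_ERROR", "TEST_FAILURE", "NO_TESTS_COLLECTED"]
  match pickLoopA priority types with
  | some item => item
  | none => match types with
    | [] => "FAILURE"
    | t :: _ => t

-- ===== PORT B =====
def rankB : PySem.Dict String Int :=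
  PySem.Dict.ofList [("COLLECTION_ERROR", 0), ("IMPORT_ERROR", 1), ("ASSERTION_ERROR", 2),
                     ("TEST_FAILURE", 3), ("NO_TESTS_COLLECTED", 4)]

-- body of the `for t in types:` loop
def stepB (best : Option (Int × String)) (t : String) : Option (Int × String) :=
  match rankB.get? t with
  | none => best
  | some r => match best with
    | none => some (r, t)
    | some (br, _) => if r < br then some (r, t) else best

def pick_failure_type_py_alt (types : List String) : String :=
  match types.foldl stepB none with
  | some (_, bt) => bt
  | none => match types with
    | [] => "FAILURE"
    | t :: _ => t

-- ===== PRECONDITION & SPEC =====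
def Spec_pick_failure_type_py (types : List String) (out : String) : Prop := out = pick_failure_type_py_alt types
instance (types : List String) (out : String) : Decidable (Spec_pick_failure_type_py types out) := by unfold Spec_pick_failure_type_py; infer_instance

-- ===== CLAIM (what is proved, stated in full; the proofs are below) =====
def Claim_equal_pick_failure_type_py : Prop := ∀ (types : List String), Dom_pick_failure_type_py types → Spec_pick_failure_type_py types (pick_failure_type_py types)

-- ===== LEMMAS AND PROOFS =====

-- the state of B's loop when the best rank seen so far is i (i = 5 : nothing matched yet)
def stB (i : Nat) : Option (Int × String) :=
  (["COLLECTION_ERROR", "IMPORT_ERROR", "ASSERTION_ERROR", "TEST_FAILURE", "NO_TESTS_COLLECTED"][i]?).map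
    (fun s => ((i : Int), s))

-- index of the highest-priority entry occurring in xs (5 if none occurs)
def muR (xs : List String) : Nat :=
  if xs.contains "COLLECTION_ERROR" then 0
  else if xs.contains "IMPORT_ERROR" then 1
  else if xs.contains "ASSERTION_ERROR" then 2
  else if xs.contains "TEST_FAILURE" then 3
  else if xs.contains "NO_TESTS_COLLECTED" then 4
  else 5

theorem rankB_get (t : String) :
    rankB.get? t =
      if t = "COLLECTION_ERROR" then some 0
      else if t = "IMPORT_ERROR" then some 1
      else if t = "ASSERTION_ERROR" then some 2
      else if t = "TEST_FAILURE" then some 3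
      else if t = "NO_TESTS_COLLECTED" then some 4
      else none := by
  by_cases h0 : t = "COLLECTION_ERROR"
  · subst h0; decide
  by_cases h1 : t = "IMPORT_ERROR"
  · subst h1; decide
  by_cases h2 : t = "ASSERTION_ERROR"
  · subst h2; decide
  by_cases h3 : t = "TEST_FAILURE"
  · subst h3; decide
  by_cases h4 : t = "NO_TESTS_COLLECTED"
  · subst h4; decide
  rw [show rankB = PySem.Dict.mk [("COLLECTION_ERROR", 0), ("IMPORT_ERROR", 1),
      ("ASSERTION_ERROR", 2), ("TEST_FAILURE", 3), ("NO_TESTS_COLLECTED", 4)] from rfl]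
  simp only [PySem.Dict.get?_mk_cons, beq_iff_eq,
    if_neg (Ne.symm h0), if_neg (Ne.symm h1), if_neg (Ne.symm h2), if_neg (Ne.symm h3),
    if_neg (Ne.symm h4), if_neg h0, if_neg h1, if_neg h2, if_neg h3, if_neg h4]
  rfl

theorem muR_cons (t : String) (rest : List String) :
    muR (t :: rest) =
      if t = "COLLECTION_ERROR" then min 0 (muR rest)
      else if t = "IMPORT_ERROR" then min 1 (muR rest)
      else if t = "ASSERTION_ERROR" then min 2 (muR rest)
      else if t = "TEST_FAILURE" then min 3 (muR rest)
      else if t = "NO_TESTS_COLLECTED" then min 4 (muR rest)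
      else muR rest := by
  unfold muR
  simp only [List.contains_cons, Bool.or_eq_true, beq_iff_eq]
  by_cases h0 : t = "COLLECTION_ERROR" <;>
    by_cases h1 : t = "IMPORT_ERROR" <;>
    by_cases h2 : t = "ASSERTION_ERROR" <;>
    by_cases h3 : t = "TEST_FAILURE" <;>
    by_cases h4 : t = "NO_TESTS_COLLECTED" <;>
    subst_vars <;>
    simp_all [eq_comm] <;>
    split_ifs <;> omega

theorem stepB_stB (i : Nat) (hi : i ≤ 5) (t : String) :
    stepB (stB i) t =
      if t = "COLLECTION_ERROR" then stB (min i 0)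
      else if t = "IMPORT_ERROR" then stB (min i 1)
      else if t = "ASSERTION_ERROR" then stB (min i 2)
      else if t = "TEST_FAILURE" then stB (min i 3)
      else if t = "NO_TESTS_COLLECTED" then stB (min i 4)
      else stB i := by
  unfold stepB
  rw [rankB_get]
  split_ifs <;> subst_vars <;> first
    | rfl
    | (interval_cases i <;> decide)

theorem fold_stB (xs : List String) : ∀ i, i ≤ 5 →
    xs.foldl stepB (stB i) = stB (min i (muR xs)) := by
  induction xs with
  | nil =>
    intro i hi
    have h : min i (muR []) = i := by unfold muR; simp; omega
    rw [List.foldl_nil, h]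
  | cons t rest ih =>
    intro i hi
    rw [List.foldl_cons, stepB_stB i hi t, muR_cons]
    split_ifs <;>
      rw [ih _ (by omega)] <;> congr 1 <;> omega

theorem ports_eq (types : List String) :
    pick_failure_type_py types = pick_failure_type_py_alt types := by
  unfold pick_failure_type_py pick_failure_type_py_alt
  have h : types.foldl stepB none = stB (min 5 (muR types)) := fold_stB types 5 (le_refl 5)
  rw [h]
  simp only [pickLoopA]
  unfold muR
  split_ifs <;> rfl

-- ===== VERDICT (by name: the statement is the Claim_ definition above) =====
theorem pick_failure_type_py_spec : Claim_equal_pick_failure_type_py := by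
  intro types _
  unfold Spec_pick_failure_type_py
  exact ports_eq types
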